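-- pv_equiv track=rewrite | github.com/dannycho7/cs221 | hw1/submission.py | mutate_sentences
-- ===== SOURCE A (Python) =====
-- import collections
-- from queue import Queue
-- from typing import Any, DefaultDict, List, Set, Tuple
--
-- def mutate_sentences(sentence: str) -> List[str]:
--     """
--     Given a sentence (sequence of words), return a list of all "similar"
--     sentences.
--     We define a sentence to be similar to the original sentence if
--       - it as the same number of words, and
--       - each pair of adjacent words in the new sentence also occurs in the original sentence
--         (the words within each pair should appear in the same order in the output sentence
--          as they did in the original sentence.)
--     Notes:
--       - The order of the sentences you output doesn't matter.
--       - You must not output duplicates.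
--       - Your generated sentence can use a word in the original sentence more than
--         once.
--     Example:
--       - Input: 'the cat and the mouse'
--       - Output: ['and the cat and the', 'the cat and the mouse', 'the cat and the cat', 'cat and the cat and']
--                 (reordered versions of this list are allowed)
--     """
--     # BEGIN_YOUR_CODE (our solution is 17 lines of code, but don't worry if you deviate from this)
--     sentenceWords = sentence.split(" ")
--     wordToAdjWords = collections.defaultdict(set)
--     for i, word in enumerate(sentenceWords):
--         if i < len(sentenceWords) - 1:
--             wordToAdjWords[word].add(sentenceWords[i + 1])
--     toProcess = Queue() # [words]
--     for word in wordToAdjWords: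
--         toProcess.put([word])
--     answer = []
--     while not toProcess.empty():
--         words = toProcess.get()
--         if len(words) == len(sentenceWords):
--             answer.append(" ".join(words))
--         else:
--             for nextWord in wordToAdjWords[words[-1]]:
--                 toProcess.put(words + [nextWord])
--     return answer
-- ===== SOURCE B (Python) =====
-- def mutate_sentences(sentence):
--     # Recursive DFS: enumerate all k-step walks from each start word, instead of a
--     # queue-driven BFS over partial sentences.
--     words = sentence.split(" ")
--     adj = {}
--     for a, b in zip(words, words[1:]):
--         adj.setdefault(a, set()).add(b)
--
--     def walks(w, k):
--         if k == 0:
--             return [[w]]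
--         return [[w] + rest for nxt in adj.get(w, ()) for rest in walks(nxt, k - 1)]
--
--     return [" ".join(seq) for w in adj for seq in walks(w, len(words) - 1)]
-- ===== Notes on version B (the rewrite author's own statement) =====
-- stated objective: alternative
-- what changed: Replaces A's queue-driven BFS over partial sentences (dequeue, length test, re-enqueue extensions via queue.Queue) with a recursive depth-first enumeration walks(w,k) of all k-step walks of the successor graph from each start word, assembled by nested comprehensions; the adjacency map is built from zip(words, words[1:]) instead of enumerate with an index test. The DFS leaf order coincides with A's BFS completion order because all outputs sit at uniform depth and child order is preserved.
import Mathlib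
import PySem

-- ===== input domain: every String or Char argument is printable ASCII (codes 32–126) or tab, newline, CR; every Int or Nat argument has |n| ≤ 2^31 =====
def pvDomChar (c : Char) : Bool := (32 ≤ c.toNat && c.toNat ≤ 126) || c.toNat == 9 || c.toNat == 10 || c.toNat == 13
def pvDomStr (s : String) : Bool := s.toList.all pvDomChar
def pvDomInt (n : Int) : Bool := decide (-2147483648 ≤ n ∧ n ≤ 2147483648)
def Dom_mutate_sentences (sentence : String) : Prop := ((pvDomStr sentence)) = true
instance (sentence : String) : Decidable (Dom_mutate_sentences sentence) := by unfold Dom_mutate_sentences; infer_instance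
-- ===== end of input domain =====

-- B replaces A's queue-driven BFS over partial sentences by a recursive depth-first
-- enumeration of all (n-1)-step walks of the successor graph from each start word;
-- the DFS leaf order coincides with A's BFS completion order (all outputs sit at
-- uniform depth and child order is preserved), so the returned lists are identical.

-- ===== PORT A =====
-- sentenceWords = sentence.split(" ")
def msWordsA (sentence : String) : List String := (PySem.Str.split? sentence " ").getD []

-- wordToAdjWords: for i, word in enumerate(sentenceWords): if i < len-1: wordToAdjWords[word].add(sentenceWords[i+1])
def msAdjA (words : List String) : PySem.Dict String (PySem.Set String) :=
  (PySem.List.enumerate words).foldl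
    (fun d p =>
      if p.1 < (words.length : Int) - 1 then
        d.insert p.2 (PySem.Set.add (d.getD p.2 PySem.Set.empty) (PySem.List.pyGetD words (p.1 + 1) ""))
      else d)
    PySem.Dict.empty

-- total size of all successor sets (used only by the fuel bound below)
def msTotal (adj : PySem.Dict String (PySem.Set String)) : Nat :=
  (adj.values.map List.length).sum

-- fuel guard for the while-loop (an upper bound on the number of dequeues, proven sufficient below)
def msFuelA (sentence : String) : Nat :=
  (msWordsA sentence).length * (msAdjA (msWordsA sentence)).keys.length *
    (msTotal (msAdjA (msWordsA sentence)) + 1) ^ (msWordsA sentence).length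

-- while not toProcess.empty(): words = get(); if len(words)==n: answer.append(" ".join(words))
--   else: for nextWord in wordToAdjWords[words[-1]]: put(words + [nextWord])
-- (FIFO queue = list consumed from the front; fuel only totalises the recursion)
def msLoopA (n : Nat) (adj : PySem.Dict String (PySem.Set String)) :
    Nat → List (List String) → List String
  | _, [] => []
  | 0, _ :: _ => []
  | fuel + 1, ws :: rest =>
      if ws.length = n then
        PySem.Str.join " " ws :: msLoopA n adj fuel rest
      else
        msLoopA n adj fuel
          (rest ++ (adj.getD (PySem.List.pyGetD ws (-1) "") PySem.Set.empty).map (fun nw => ws ++ [nw]))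

def mutate_sentences (sentence : String) : List String :=
  msLoopA (msWordsA sentence).length (msAdjA (msWordsA sentence)) (msFuelA sentence)
    ((msAdjA (msWordsA sentence)).keys.map (fun w => [w]))

-- ===== PORT B =====
-- words = sentence.split(" ")
def msWordsB (sentence : String) : List String := (PySem.Str.split? sentence " ").getD []

-- for a, b in zip(words, words[1:]): adj.setdefault(a, set()).add(b)
def msAdjB (words : List String) : PySem.Dict String (PySem.Set String) :=
  (words.zip (words.drop 1)).foldl
    (fun d p => d.insert p.1 (PySem.Set.add (d.getD p.1 PySem.Set.empty) p.2))
    PySem.Dict.empty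

-- def walks(w, k): if k == 0: return [[w]]
--                  return [[w] + rest for nxt in adj.get(w, ()) for rest in walks(nxt, k - 1)]
def msWalks (adj : PySem.Dict String (PySem.Set String)) : Nat → String → List (List String)
  | 0, w => [[w]]
  | k + 1, w =>
      (adj.getD w PySem.Set.empty).flatMap
        (fun nxt => (msWalks adj k nxt).map (fun rest => w :: rest))

-- return [" ".join(seq) for w in adj for seq in walks(w, len(words) - 1)]
def mutate_sentences_alt (sentence : String) : List String :=
  (msAdjB (msWordsB sentence)).keys.flatMap
    (fun w =>
      (msWalks (msAdjB (msWordsB sentence)) ((msWordsB sentence).length - 1) w).map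
        (fun seq => PySem.Str.join " " seq))

-- ===== PRECONDITION & SPEC =====
def Spec_mutate_sentences (sentence : String) (out : List String) : Prop := out = mutate_sentences_alt sentence
instance (sentence : String) (out : List String) : Decidable (Spec_mutate_sentences sentence out) := by unfold Spec_mutate_sentences; infer_instance

-- ===== CLAIM (what is proved, stated in full; the proofs are below) =====
def Claim_equal_mutate_sentences : Prop := ∀ (sentence : String), Dom_mutate_sentences sentence → Spec_mutate_sentences sentence (mutate_sentences sentence)

-- ===== LEMMAS AND PROOFS =====

-- one whole-frontier expansion pass of A's BFS (proof-side helper)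
def msStep (adj : PySem.Dict String (PySem.Set String)) (fr : List (List String)) : List (List String) :=
  fr.flatMap (fun seq =>
    (adj.getD (PySem.List.pyGetD seq (-1) "") PySem.Set.empty).map (fun nw => seq ++ [nw]))

-- exact number of dequeues A's loop performs from a queue q of uniform-depth items, k levels from the end
def msFuel (adj : PySem.Dict String (PySem.Set String)) : Nat → List (List String) → Nat
  | 0, q => q.length
  | k + 1, q => q.length + msFuel adj k (msStep adj q)

theorem msLoopA_nil (n : Nat) (adj : PySem.Dict String (PySem.Set String)) (f : Nat) :
    msLoopA n adj f [] = [] := by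
  cases f <;> rfl

theorem adj_fold_suffix (words : List String) :
    ∀ (m j : Nat), j + m = words.length → ∀ d : PySem.Dict String (PySem.Set String),
    (PySem.List.enumerate (words.drop j) (j : Int)).foldl
      (fun d p =>
        if p.1 < (words.length : Int) - 1 then
          d.insert p.2 (PySem.Set.add (d.getD p.2 PySem.Set.empty) (PySem.List.pyGetD words (p.1 + 1) ""))
        else d) d
    = ((words.drop j).zip (words.drop (j + 1))).foldl
        (fun d p => d.insert p.1 (PySem.Set.add (d.getD p.1 PySem.Set.empty) p.2)) d := by
  intro m
  induction m with
  | zero =>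
      intro j hj d
      rw [List.drop_of_length_le (by omega), List.drop_of_length_le (by omega)]
      simp [PySem.List.enumerate_nil]
  | succ m ih =>
      intro j hj d
      have hjlt : j < words.length := by omega
      rw [List.drop_eq_getElem_cons hjlt, PySem.List.enumerate_cons]
      by_cases hm : m = 0
      · subst hm
        have hj1 : words.length ≤ j + 1 := by omega
        rw [List.drop_of_length_le hj1]
        simp only [List.zip_nil_right, List.foldl_nil, List.foldl_cons,
          PySem.List.enumerate_nil]
        rw [if_neg (by omega)]
      · have hj1 : j + 1 < words.length := by omega
        rw [List.drop_eq_getElem_cons hj1]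
        simp only [List.zip_cons_cons, List.foldl_cons]
        rw [if_pos (by omega)]
        have hcast : ((j : Int) + 1) = ((j + 1 : Nat) : Int) := by push_cast; ring
        rw [hcast, PySem.List.pyGetD_natCast, List.getD_eq_getElem _ _ hj1,
          ← List.drop_eq_getElem_cons hj1]
        exact ih (j + 1) (by omega) _

theorem msAdjA_eq_msAdjB (words : List String) : msAdjA words = msAdjB words := by
  have h := adj_fold_suffix words words.length 0 (by omega) PySem.Dict.empty
  simpa [msAdjA, msAdjB] using h

theorem msStep_length_mem {adj : PySem.Dict String (PySem.Set String)} {q : List (List String)}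
    {w : List String} (h : w ∈ msStep adj q) : ∃ v ∈ q, w.length = v.length + 1 := by
  rcases List.mem_flatMap.mp h with ⟨v, hv, hw⟩
  rcases List.mem_map.mp hw with ⟨nw, _, rfl⟩
  exact ⟨v, hv, by simp⟩

theorem get?_mem_values {l : List (String × PySem.Set String)} {k : String} {v : PySem.Set String}
    (h : (PySem.Dict.mk l).get? k = some v) : v ∈ l.map Prod.snd := by
  induction l with
  | nil => simp [PySem.Dict.get?] at h
  | cons p rest ih =>
      rw [show (PySem.Dict.mk (p :: rest)) = PySem.Dict.mk ((p.1, p.2) :: rest) by rfl,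
        PySem.Dict.get?_mk_cons] at h
      by_cases hk : (p.1 == k) = true
      · simp [hk] at h; simp [← h]
      · simp [hk] at h; simpa using Or.inr (ih h)

theorem getD_length_le (adj : PySem.Dict String (PySem.Set String)) (k : String) :
    (adj.getD k PySem.Set.empty).length ≤ msTotal adj := by
  unfold PySem.Dict.getD msTotal
  cases h : adj.get? k with
  | none => simp [PySem.Set.empty]
  | some v =>
      simp only [Option.getD_some]
      have hv : v ∈ adj.items.map Prod.snd := by
        cases adj with
        | mk l => exact get?_mem_values h
      have : v.length ∈ (adj.values.map List.length) := by
        unfold PySem.Dict.values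
        exact List.mem_map.mpr ⟨v, by simpa using hv, rfl⟩
      exact List.single_le_sum (by intro x _; exact Nat.zero_le x) _ this

theorem msStep_length (adj : PySem.Dict String (PySem.Set String)) (q : List (List String)) :
    (msStep adj q).length ≤ q.length * msTotal adj := by
  unfold msStep
  rw [List.length_flatMap]
  have := List.sum_le_card_nsmul
    (q.map (fun seq => ((adj.getD (PySem.List.pyGetD seq (-1) "") PySem.Set.empty).map
      (fun nw => seq ++ [nw])).length)) (msTotal adj) ?_
  · simpa [smul_eq_mul] using this
  · intro x hx
    rcases List.mem_map.mp hx with ⟨seq, _, rfl⟩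
    simpa using getD_length_le adj _

theorem msFuel_le (adj : PySem.Dict String (PySem.Set String)) (k : Nat) (q : List (List String)) :
    msFuel adj k q ≤ (k + 1) * q.length * (msTotal adj + 1) ^ k := by
  induction k generalizing q with
  | zero => simp [msFuel]
  | succ k ih =>
      have h1 := ih (msStep adj q)
      have h2 := msStep_length adj q
      have hp : 1 ≤ (msTotal adj + 1) ^ k := Nat.one_le_pow _ _ (Nat.succ_pos _)
      calc msFuel adj (k + 1) q = q.length + msFuel adj k (msStep adj q) := rfl
        _ ≤ q.length + (k + 1) * (q.length * msTotal adj) * (msTotal adj + 1) ^ k := by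
              refine Nat.add_le_add_left (le_trans h1 ?_) _
              exact Nat.mul_le_mul_right _ (Nat.mul_le_mul_left _ h2)
        _ ≤ (k + 2) * q.length * (msTotal adj + 1) ^ (k + 1) := by
              rw [pow_succ]
              have hL : q.length * 1 ≤ q.length * (msTotal adj + 1) ^ k :=
                Nat.mul_le_mul_left _ hp
              nlinarith [hp, hL]

theorem msLoopA_append_full (n : Nat) (adj : PySem.Dict String (PySem.Set String))
    (q1 q2 : List (List String)) (f : Nat) (h : ∀ w ∈ q1, w.length = n) :
    msLoopA n adj (q1.length + f) (q1 ++ q2) =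
      q1.map (PySem.Str.join " ") ++ msLoopA n adj f q2 := by
  induction q1 generalizing f with
  | nil => simp
  | cons w q1 ih =>
      have hw : w.length = n := h w (List.mem_cons_self)
      have : (w :: q1).length + f = (q1.length + f) + 1 := by simp; omega
      rw [this]
      show msLoopA n adj ((q1.length + f) + 1) (w :: (q1 ++ q2)) = _
      rw [msLoopA, if_pos hw, ih f (fun v hv => h v (List.mem_cons_of_mem _ hv))]
      rfl

theorem msLoopA_append_step (n : Nat) (adj : PySem.Dict String (PySem.Set String))
    (q1 : List (List String)) (h : ∀ w ∈ q1, w.length < n) :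
    ∀ (q2 : List (List String)) (f : Nat),
    msLoopA n adj (q1.length + f) (q1 ++ q2) = msLoopA n adj f (q2 ++ msStep adj q1) := by
  induction q1 with
  | nil => intro q2 f; simp [msStep]
  | cons w q1 ih =>
      intro q2 f
      have hw : w.length ≠ n := Nat.ne_of_lt (h w (List.mem_cons_self))
      have hlen : (w :: q1).length + f = (q1.length + f) + 1 := by simp; omega
      rw [hlen]
      show msLoopA n adj ((q1.length + f) + 1) (w :: (q1 ++ q2)) = _
      rw [msLoopA, if_neg hw]
      have := ih (fun v hv => h v (List.mem_cons_of_mem _ hv))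
        (q2 ++ (adj.getD (PySem.List.pyGetD w (-1) "") PySem.Set.empty).map (fun nw => w ++ [nw])) f
      rw [← List.append_assoc] at this
      rw [this]
      have : msStep adj (w :: q1) =
          (adj.getD (PySem.List.pyGetD w (-1) "") PySem.Set.empty).map (fun nw => w ++ [nw]) ++ msStep adj q1 := by
        simp [msStep]
      rw [this, List.append_assoc]

theorem msLoopA_levels (n : Nat) (adj : PySem.Dict String (PySem.Set String)) :
    ∀ (k : Nat) (q : List (List String)) (f : Nat), (∀ w ∈ q, w.length + k = n) →
    msLoopA n adj (msFuel adj k q + f) q = ((msStep adj)^[k] q).map (PySem.Str.join " ") := by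
  intro k
  induction k with
  | zero =>
      intro q f h
      have hf : msFuel adj 0 q + f = q.length + f := rfl
      have happ := msLoopA_append_full n adj q [] f
        (by intro w hw; have := h w hw; omega)
      rw [List.append_nil] at happ
      rw [hf, happ]
      simp [msLoopA_nil]
  | succ k ih =>
      intro q f h
      have hf : msFuel adj (k + 1) q + f = q.length + (msFuel adj k (msStep adj q) + f) := by
        simp [msFuel]; omega
      have hstep := msLoopA_append_step n adj q
        (by intro w hw; have := h w hw; omega) [] (msFuel adj k (msStep adj q) + f)
      rw [List.append_nil, List.nil_append] at hstep
      rw [hf, hstep]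
      rw [ih (msStep adj q) f ?_]
      · rw [← Function.iterate_succ_apply]
      · intro w hw
        rcases msStep_length_mem hw with ⟨v, hv, hl⟩
        have := h v hv
        omega

-- last element of a nonempty list via Python's l[-1]
theorem pyGetD_neg_one_append (p : List String) (w : String) (d : String) :
    PySem.List.pyGetD (p ++ [w]) (-1) d = w := by
  simp [PySem.List.pyGetD, PySem.List.pyGet?, PySem.List.pyIdx?]

-- all k-step extensions of one partial sentence, in DFS order (proof-side helper)
def msExt (adj : PySem.Dict String (PySem.Set String)) : Nat → List String → List (List String)
  | 0, seq => [seq]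
  | k + 1, seq =>
      (adj.getD (PySem.List.pyGetD seq (-1) "") PySem.Set.empty).flatMap
        (fun x => msExt adj k (seq ++ [x]))

theorem msStep_iterate_eq_ext (adj : PySem.Dict String (PySem.Set String)) :
    ∀ (k : Nat) (q : List (List String)),
    (msStep adj)^[k] q = q.flatMap (msExt adj k) := by
  intro k
  induction k with
  | zero => intro q; simp [msExt]
  | succ k ih =>
      intro q
      rw [Function.iterate_succ_apply, ih]
      show (msStep adj q).flatMap (msExt adj k) = _
      unfold msStep
      rw [List.flatMap_assoc]
      refine List.flatMap_congr ?_
      intro seq _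
      rw [List.flatMap_map]
      rfl

theorem msExt_eq_walks (adj : PySem.Dict String (PySem.Set String)) :
    ∀ (k : Nat) (p : List String) (w : String),
    msExt adj k (p ++ [w]) = (msWalks adj k w).map (fun r => p ++ r) := by
  intro k
  induction k with
  | zero => intro p w; simp [msExt, msWalks]
  | succ k ih =>
      intro p w
      show ((adj.getD (PySem.List.pyGetD (p ++ [w]) (-1) "") PySem.Set.empty).flatMap
        (fun x => msExt adj k ((p ++ [w]) ++ [x]))) = _
      rw [pyGetD_neg_one_append]
      unfold msWalks
      rw [List.map_flatMap]
      refine List.flatMap_congr ?_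
      intro x _
      rw [ih (p ++ [w]) x, List.map_map]
      refine List.map_congr_left ?_
      intro r _
      simp

theorem msStep_iterate_nil (adj : PySem.Dict String (PySem.Set String)) (m : Nat) :
    (msStep adj)^[m] [] = [] := by
  rw [msStep_iterate_eq_ext]; rfl

-- ===== VERDICT (by name: the statement is the Claim_ definition above) =====
theorem mutate_sentences_spec : Claim_equal_mutate_sentences := by
  intro sentence _
  unfold Spec_mutate_sentences mutate_sentences mutate_sentences_alt
  have hwB : msWordsB sentence = msWordsA sentence := rfl
  rw [hwB, ← msAdjA_eq_msAdjB]
  set adj := msAdjA (msWordsA sentence) with hadj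
  have hB : adj.keys.flatMap
      (fun w => (msWalks adj ((msWordsA sentence).length - 1) w).map
        (fun seq => PySem.Str.join " " seq))
      = ((msStep adj)^[(msWordsA sentence).length - 1]
          (adj.keys.map (fun w => [w]))).map (PySem.Str.join " ") := by
    rw [msStep_iterate_eq_ext, List.flatMap_map]
    rw [List.map_flatMap]
    refine List.flatMap_congr ?_
    intro w _
    have := msExt_eq_walks adj ((msWordsA sentence).length - 1) [] w
    simp only [List.nil_append] at this
    rw [this, List.map_map]
    simp
  rw [hB]
  by_cases hwnil : msWordsA sentence = []
  · rw [hwnil]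
    have hq0 : (msAdjA ([] : List String)).keys.map (fun w => [w]) = ([] : List (List String)) := rfl
    rw [show adj = msAdjA ([] : List String) by rw [hadj, hwnil], hq0, msLoopA_nil,
      msStep_iterate_nil]
    rfl
  · have hn : 1 ≤ (msWordsA sentence).length := by
      cases h : msWordsA sentence with
      | nil => exact absurd h hwnil
      | cons a l => simp
    have hq0len : (adj.keys.map (fun w => ([w] : List String))).length = adj.keys.length :=
      List.length_map ..
    have hle : msFuel adj ((msWordsA sentence).length - 1)
        (adj.keys.map (fun w => [w])) ≤ msFuelA sentence := by
      have h1 := msFuel_le adj ((msWordsA sentence).length - 1)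
        (adj.keys.map (fun w => [w]))
      have h2 : ((msWordsA sentence).length - 1 + 1) = (msWordsA sentence).length := by omega
      rw [h2, hq0len] at h1
      refine le_trans h1 ?_
      show _ ≤ (msWordsA sentence).length * adj.keys.length *
        (msTotal adj + 1) ^ (msWordsA sentence).length
      exact Nat.mul_le_mul_left _ (Nat.pow_le_pow_right (Nat.succ_pos _) (by omega))
    obtain ⟨r, hr⟩ : ∃ r, msFuelA sentence = msFuel adj
        ((msWordsA sentence).length - 1)
        (adj.keys.map (fun w => [w])) + r :=
      ⟨msFuelA sentence - msFuel adj ((msWordsA sentence).length - 1)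
        (adj.keys.map (fun w => [w])), by omega⟩
    rw [hr, msLoopA_levels _ _ _ _ r ?_]
    intro w hw
    rcases List.mem_map.mp hw with ⟨k, _, rfl⟩
    simp
    omega
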